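-- pv_equiv track=rewrite | github.com/altith01/ProjectEuler | Solved/51.py | has_three
-- ===== SOURCE A (Python) =====
-- def has_three(n):
--     num = str(n)
--     parts = []
--     for char in num:
--         parts.append(char)
--     parts.sort()
--     prev = 'x'
--     c = 1
--     for part in parts:
--         if part < '3' and part == prev:
--             c += 1
--             if c == 3:
--                 return int(part)
--         else:
--             prev = part
--             c = 1
--     return -1
-- ===== SOURCE B (Python) =====
-- def has_three(n):
--     counts = {}
--     for ch in str(n):
--         counts[ch] = counts.get(ch, 0) + 1
--     for d in "012":
--         if counts.get(d, 0) >= 3: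
--             return int(d)
--     return -1
-- ===== Notes on version B (the rewrite author's own statement) =====
-- stated objective: simpler
-- what changed: Replaced the sort + run-length scan with a one-pass digit-frequency dict followed by a lookup over the three candidate digits '0','1','2'.
import Mathlib
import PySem

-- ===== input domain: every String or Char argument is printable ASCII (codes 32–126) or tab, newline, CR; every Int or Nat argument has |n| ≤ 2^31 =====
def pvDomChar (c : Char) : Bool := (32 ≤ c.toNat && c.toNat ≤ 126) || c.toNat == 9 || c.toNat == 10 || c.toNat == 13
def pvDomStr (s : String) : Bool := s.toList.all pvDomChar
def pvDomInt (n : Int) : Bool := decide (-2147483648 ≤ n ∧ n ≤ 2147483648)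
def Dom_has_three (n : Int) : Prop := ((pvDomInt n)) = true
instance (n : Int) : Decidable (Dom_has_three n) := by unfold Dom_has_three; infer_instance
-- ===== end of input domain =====

-- B replaces A's sort + run-length scan with a one-pass character-frequency dict and a
-- lookup over the three candidate digits '0','1','2' (objective: simpler).

-- ===== PORT A =====
-- the run-length scan over the sorted character list (prev = 'x', c = 1 initially);
-- int(part): the reachable part is always a digit char, so the ValueError default is never used
def hasThreeLoop : List Char → Char → Int → Int
  | [], _, _ => -1
  | part :: rest, prev, c =>
    if part < '3' ∧ part = prev then
      if c + 1 = 3 then (PySem.Int.ofStr? (String.mk [part])).getD 0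
      else hasThreeLoop rest prev (c + 1)
    else hasThreeLoop rest part 1

def has_three (n : Int) : Int :=
  let num := PySem.Int.toStr n
  let parts := num.toList.foldl (fun acc ch => acc ++ [ch]) ([] : List Char)
  let sortedParts := PySem.List.sorted parts (fun x => x) false
  hasThreeLoop sortedParts 'x' 1

-- ===== PORT B =====
-- the 'for d in "012"' loop over the counts dict
def altLoop : List Char → PySem.Dict Char Int → Int
  | [], _ => -1
  | d :: ds, counts =>
    if 3 ≤ counts.getD d 0 then (PySem.Int.ofStr? (String.mk [d])).getD 0
    else altLoop ds counts

def has_three_alt (n : Int) : Int :=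
  let s := PySem.Int.toStr n
  let counts := s.toList.foldl (fun m ch => m.insert ch (m.getD ch 0 + 1)) (PySem.Dict.empty : PySem.Dict Char Int)
  altLoop "012".toList counts

-- ===== PRECONDITION & SPEC =====
def Spec_has_three (n : Int) (out : Int) : Prop := out = has_three_alt n
instance (n : Int) (out : Int) : Decidable (Spec_has_three n out) := by unfold Spec_has_three; infer_instance

-- ===== CLAIM (what is proved, stated in full; the proofs are below) =====
def Claim_equal_has_three : Prop := ∀ (n : Int), Dom_has_three n → Spec_has_three n (has_three n)

-- ===== LEMMAS AND PROOFS =====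

-- the common target: first of '0','1','2' with effective count ≥ 3, else -1
def pvTgt (cnt : Char → Int) : Int :=
  if 3 ≤ cnt '0' then 0 else if 3 ≤ cnt '1' then 1 else if 3 ≤ cnt '2' then 2 else -1

theorem charTrichotomy (c : Char) (h : c < '3') : c = '0' ∨ c = '1' ∨ c = '2' ∨ c < '0' := by
  have h1 : c.toNat < 51 := by simpa [Char.lt_def, UInt32.lt_iff_toNat_lt] using h
  by_cases h0 : c.toNat < 48
  · right; right; right; simp [Char.lt_def, UInt32.lt_iff_toNat_lt]; omega
  · have h2 : c.toNat = 48 ∨ c.toNat = 49 ∨ c.toNat = 50 := by omega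
    rcases h2 with h|h|h
    · left; exact Char.ext (UInt32.toNat_inj.mp (by simpa using h))
    · right; left; exact Char.ext (UInt32.toNat_inj.mp (by simpa using h))
    · right; right; left; exact Char.ext (UInt32.toNat_inj.mp (by simpa using h))

theorem digitChar_range (m : Nat) (hm : m < 10) : '0' ≤ m.digitChar ∧ m.digitChar ≤ '9' := by
  interval_cases m <;> decide

theorem toDigitsCore_chars (f : Nat) : ∀ (n : Nat) (l : List Char) (c : Char),
    c ∈ Nat.toDigitsCore 10 f n l → c ∈ l ∨ ('0' ≤ c ∧ c ≤ '9') := by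
  induction f with
  | zero => intro n l c hc; exact Or.inl hc
  | succ f ih =>
    intro n l c hc
    simp only [Nat.toDigitsCore] at hc
    by_cases hn : n / 10 = 0
    · simp [hn] at hc
      rcases hc with hc|hc
      · subst hc; exact Or.inr (digitChar_range _ (Nat.mod_lt _ (by norm_num)))
      · exact Or.inl hc
    · simp [hn] at hc
      rcases ih _ _ _ hc with hc'|hc'
      · rcases List.mem_cons.mp hc' with h|h
        · subst h; exact Or.inr (digitChar_range _ (Nat.mod_lt _ (by norm_num)))
        · exact Or.inl h
      · exact Or.inr hc'

theorem toChars_chars (n : Int) (c : Char) (hc : c ∈ PySem.Int.toChars n) :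
    c = '-' ∨ ('0' ≤ c ∧ c ≤ '9') := by
  unfold PySem.Int.toChars at hc
  split at hc
  · rcases List.mem_cons.mp hc with h|h
    · exact Or.inl h
    · rcases toDigitsCore_chars _ _ _ _ h with h'|h'
      · simp at h'
      · exact Or.inr h'
  · rcases toDigitsCore_chars _ _ _ _ hc with h'|h'
    · simp at h'
    · exact Or.inr h'

theorem count_dash_toChars (n : Int) : (PySem.Int.toChars n).count '-' ≤ 1 := by
  have hd : ∀ m : Nat, '-' ∉ Nat.toDigits 10 m := by
    intro m hm
    rcases toDigitsCore_chars _ _ _ _ hm with h|h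
    · simp at h
    · revert h; decide
  unfold PySem.Int.toChars
  split
  · rw [List.count_cons]
    simp [List.count_eq_zero.mpr (hd _)]
  · simp [List.count_eq_zero.mpr (hd _)]

theorem foldl_append_id (l acc : List Char) :
    l.foldl (fun a c => a ++ [c]) acc = acc ++ l := by
  induction l generalizing acc with
  | nil => simp [List.foldl]
  | cons x xs ih => simp [List.foldl, ih]

-- the main invariant of A's run-length scan on a sorted list
theorem loop_eq (l : List Char) : ∀ (prev : Char) (c : Int),
    l.Pairwise (· ≤ ·) → 1 ≤ c → c ≤ 2 →
    (prev ∈ l → ∀ x ∈ l, prev ≤ x) →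
    (∀ x : Char, x < '0' → (l.count x : Int) + (if x = prev then c else 0) < 3) →
    hasThreeLoop l prev c =
      pvTgt (fun d => (l.count d : Int) + (if d = prev then c else 0)) := by
  induction l with
  | nil =>
    intro prev c _ h1 h2 _ _
    have hite : ∀ d : Char, ¬ (3 : Int) ≤ (if d = prev then c else 0) := by
      intro d; split <;> omega
    simp [hasThreeLoop, pvTgt, hite]
  | cons p rest ih =>
    intro prev c hsorted h1 h2 hmem hsub
    have hrest : rest.Pairwise (· ≤ ·) := (List.pairwise_cons.mp hsorted).2
    have hge : ∀ x ∈ rest, p ≤ x := (List.pairwise_cons.mp hsorted).1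
    by_cases hbr : p < '3' ∧ p = prev
    · obtain ⟨hp3, hpp⟩ := hbr
      subst hpp
      rw [show hasThreeLoop (p :: rest) p c =
            (if p < '3' ∧ p = p then
              (if c + 1 = 3 then (PySem.Int.ofStr? (String.mk [p])).getD 0
               else hasThreeLoop rest p (c + 1))
             else hasThreeLoop rest p 1) from rfl]
      rw [if_pos ⟨hp3, rfl⟩]
      by_cases hc3 : c + 1 = 3
      · rw [if_pos hc3]
        have hc2 : c = 2 := by omega
        have hcntp : (3 : Int) ≤ ((p :: rest).count p : Int) + (if p = p then c else 0) := by
          simp [List.count_cons_self, hc2]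
          omega
        rcases charTrichotomy p hp3 with h|h|h|h
        · subst h
          have hc : (3 : Int) ≤ (List.count '0' ('0' :: rest) : Int) + c := by
            simpa using hcntp
          simp only [pvTgt, reduceIte]
          rw [if_pos hc]
          decide
        · subst h
          have hc : (3 : Int) ≤ (List.count '1' ('1' :: rest) : Int) + c := by
            simpa using hcntp
          have h0 : List.count '0' ('1' :: rest) = 0 := by
            apply List.count_eq_zero.mpr
            intro hmem0
            rcases List.mem_cons.mp hmem0 with h'|h'
            · exact absurd h' (by decide)
            · exact absurd (hge _ h') (by decide)
          simp only [pvTgt, reduceIte, h0, Nat.cast_zero]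
          rw [if_neg (by omega), if_pos hc]
          decide
        · subst h
          have hc : (3 : Int) ≤ (List.count '2' ('2' :: rest) : Int) + c := by
            simpa using hcntp
          have h0 : List.count '0' ('2' :: rest) = 0 := by
            apply List.count_eq_zero.mpr
            intro hmem0
            rcases List.mem_cons.mp hmem0 with h'|h'
            · exact absurd h' (by decide)
            · exact absurd (hge _ h') (by decide)
          have h1' : List.count '1' ('2' :: rest) = 0 := by
            apply List.count_eq_zero.mpr
            intro hmem1
            rcases List.mem_cons.mp hmem1 with h'|h'
            · exact absurd h' (by decide)
            · exact absurd (hge _ h') (by decide)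
          simp only [pvTgt, reduceIte, h0, h1', Nat.cast_zero]
          rw [if_neg (by omega), if_neg (by omega), if_pos hc]
          decide
        · exfalso
          have := hsub p h
          simp [List.count_cons_self] at this
          omega
      · rw [if_neg hc3]
        have hc1 : c = 1 := by omega
        have heq : (fun d => ((rest.count d : Int) + (if d = p then c + 1 else 0))) =
            (fun d => (((p :: rest).count d : Int) + (if d = p then c else 0))) := by
          funext d
          by_cases hd : d = p
          · subst hd; simp [List.count_cons_self]; omega
          · simp [hd, List.count_cons_of_ne (fun h => hd h.symm)]
        rw [ih p (c + 1) hrest (by omega) (by omega) (fun _ => hge) ?_, heq]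
        intro x hx
        have := hsub x hx
        by_cases hxp : x = p
        · subst hxp; simp [List.count_cons_self] at this ⊢; omega
        · simp [hxp, List.count_cons_of_ne (fun h => hxp h.symm)] at this ⊢; omega
    · rw [show hasThreeLoop (p :: rest) prev c =
            (if p < '3' ∧ p = prev then
              (if c + 1 = 3 then (PySem.Int.ofStr? (String.mk [p])).getD 0
               else hasThreeLoop rest prev (c + 1))
             else hasThreeLoop rest p 1) from rfl]
      rw [if_neg hbr]
      rw [ih p 1 hrest (by omega) (by omega) (fun _ => hge) ?_]
      · -- the two targets agree on '0','1','2'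
        have key : ∀ d : Char, d = '0' ∨ d = '1' ∨ d = '2' →
            (((3:Int) ≤ (rest.count d : Int) + (if d = p then 1 else 0)) ↔
             ((3:Int) ≤ ((p :: rest).count d : Int) + (if d = prev then c else 0))) := by
          intro d hd
          have hcnt : ((p :: rest).count d : Int) = (rest.count d : Int) + (if d = p then 1 else 0) := by
            by_cases hdp : d = p
            · subst hdp; simp [List.count_cons_self]
            · simp [hdp, List.count_cons_of_ne (fun h => hdp h.symm)]
          rw [hcnt]
          by_cases hdprev : d = prev
          · subst hdprev
            have hpprev : p ≠ d := by
              intro hpe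
              apply hbr
              refine ⟨?_, hpe.symm ▸ rfl⟩
              rw [hpe]
              rcases hd with h|h|h <;> (subst h; decide)
            have hprevnot : d ∉ p :: rest := by
              intro hin
              rcases List.mem_cons.mp hin with h'|h'
              · exact hpprev h'.symm
              · exact hpprev (le_antisymm (hge _ h') (hmem hin p (List.mem_cons_self)))
            have hd_ne_p : d ≠ p := fun h => hpprev h.symm
            have hcnt0 : rest.count d = 0 := by
              apply List.count_eq_zero.mpr
              intro hin
              exact hprevnot (List.mem_cons_of_mem _ hin)
            simp only [if_neg hd_ne_p, reduceIte, hcnt0, Nat.cast_zero]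
            omega
          · simp [hdprev]
        have k0 := key '0' (Or.inl rfl)
        have k1 := key '1' (Or.inr (Or.inl rfl))
        have k2 := key '2' (Or.inr (Or.inr rfl))
        simp only [pvTgt, k0, k1, k2]
      · intro x hx
        have := hsub x hx
        have hite : (0:Int) ≤ (if x = prev then c else 0) := by split <;> omega
        by_cases hxp : x = p
        · subst hxp; simp [List.count_cons_self] at this ⊢; omega
        · simp [hxp, List.count_cons_of_ne (fun h => hxp h.symm)] at this ⊢; omega

-- ===== VERDICT (by name: the statement is the Claim_ definition above) =====
theorem has_three_spec : Claim_equal_has_three := by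
  unfold Claim_equal_has_three
  intro n _
  unfold Spec_has_three has_three has_three_alt
  simp only [PySem.Int.toList_toStr, foldl_append_id, List.nil_append]
  set L := PySem.Int.toChars n with hL
  set S := PySem.List.sorted L (fun x => x) false with hS
  have hperm : S.Perm L := PySem.List.sorted_perm L (fun x => x) false
  have hA : hasThreeLoop S 'x' 1 = pvTgt (fun d => (S.count d : Int) + (if d = 'x' then 1 else 0)) := by
    apply loop_eq
    · simpa using PySem.List.sorted_pairwise L (fun x => x)
    · omega
    · omega
    · intro hx
      exfalso
      have : ('x' : Char) ∈ L := (PySem.List.mem_sorted L _ false 'x').mp hx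
      rcases toChars_chars n 'x' this with h|h
      · exact absurd h (by decide)
      · exact absurd h.2 (by decide)
    · intro x hx0
      have hxne : x ≠ 'x' := by intro h; subst h; exact absurd hx0 (by decide)
      rw [hperm.count_eq]
      by_cases hxd : x = '-'
      · subst hxd
        have := count_dash_toChars n
        rw [← hL] at this
        simp [hxne]
        omega
      · have : x ∉ L := by
          intro hin
          rcases toChars_chars n x hin with h|h
          · exact hxd h
          · exact absurd (lt_of_lt_of_le hx0 h.1) (lt_irrefl x)
        simp [hxne, List.count_eq_zero.mpr this]
  rw [hA]
  have hcnt : ∀ d : Char, ((L.foldl (fun m ch => m.insert ch (m.getD ch 0 + 1))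
      (PySem.Dict.empty : PySem.Dict Char Int)).getD d 0) = (L.count d : Int) := by
    intro d
    rw [PySem.Dict.getD_foldl_insert_add_one, PySem.Dict.getD_empty]
    omega
  have hSL : ∀ d : Char, (S.count d : Int) = (L.count d : Int) := by
    intro d; rw [hperm.count_eq]
  rw [show ("012".toList) = ['0', '1', '2'] from rfl]
  simp only [altLoop, pvTgt, hcnt, hSL,
    show ('0' : Char) ≠ 'x' from by decide, show ('1' : Char) ≠ 'x' from by decide,
    show ('2' : Char) ≠ 'x' from by decide, if_false, add_zero]
  split_ifs <;> first | rfl | decide
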